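-- pv_equiv track=rewrite | github.com/sippy/vapp | vapp/TextSynth/EN.py | sayDigits
-- ===== SOURCE A (Python) =====
-- def _phrase_noop(str):
--     return str
--
-- ONES = [
-- 	_phrase_noop("zero"),
-- 	_phrase_noop("one"),
-- 	_phrase_noop("two"),
-- 	_phrase_noop("three"),
-- 	_phrase_noop("four"),
-- 	_phrase_noop("five"),
-- 	_phrase_noop("six"),
-- 	_phrase_noop("seven"),
-- 	_phrase_noop("eight"),
-- 	_phrase_noop("nine"),
-- 	_phrase_noop("ten"),
-- 	_phrase_noop("eleven"),
-- 	_phrase_noop("twelve"),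
-- 	_phrase_noop("thirteen"),
-- 	_phrase_noop("fourteen"),
-- 	_phrase_noop("fifteen"),
-- 	_phrase_noop("sixteen"),
-- 	_phrase_noop("seventeen"),
-- 	_phrase_noop("eighteen"),
-- 	_phrase_noop("nineteen")
-- 	]
--
-- def sayDigits(num, flags):
--     retval = ""
--     prev_o = False
--     for i in str(num):
--         if (not i.isdigit()):
--             prev_o = False
--         elif (int(i) == 0):
--             if (prev_o):
--                 retval += _phrase_noop("double oh") + " "
--                 prev_o = False
--             else:
--                 prev_o = True
--         else:
--             if (prev_o):
--                 retval += _phrase_noop("oh") + " "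
--                 prev_o = False
--             retval += ONES[int(i)] + " "
--     if (prev_o):
--         retval += _phrase_noop("oh")
--
--     return retval.rstrip()
-- ===== SOURCE B (Python) =====
-- from itertools import groupby
--
-- ONES = ["zero", "one", "two", "three", "four", "five", "six", "seven",
--         "eight", "nine", "ten", "eleven", "twelve", "thirteen", "fourteen",
--         "fifteen", "sixteen", "seventeen", "eighteen", "nineteen"]
--
--
-- def _key(c):
--     return '0' if c == '0' else ('d' if c.isdigit() else 'x')
--
--
-- def sayDigits(num, flags):
--     groups = [(k, list(g)) for k, g in groupby(str(num), key=_key)]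
--     tokens = []
--     for idx, (k, chars) in enumerate(groups):
--         if k == '0':
--             c = len(chars)
--             tokens.extend(["double oh"] * (c // 2))
--             if c % 2 == 1 and not (idx + 1 < len(groups) and groups[idx + 1][0] == 'x'):
--                 tokens.append("oh")
--         elif k == 'd':
--             tokens.extend(ONES[int(ch)] for ch in chars)
--     return " ".join(tokens)
-- ===== Notes on version B (the rewrite author's own statement) =====
-- stated objective: alternative
-- what changed: B replaces A's char-by-char boolean-flag loop with string concatenation by a groupby-style single pass over maximal runs of str(num): each zero run of length c yields c//2 'double oh' tokens plus a lookahead-decided leftover 'oh', nonzero digits map directly through ONES, and the tokens are joined with ' '.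
import Mathlib
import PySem

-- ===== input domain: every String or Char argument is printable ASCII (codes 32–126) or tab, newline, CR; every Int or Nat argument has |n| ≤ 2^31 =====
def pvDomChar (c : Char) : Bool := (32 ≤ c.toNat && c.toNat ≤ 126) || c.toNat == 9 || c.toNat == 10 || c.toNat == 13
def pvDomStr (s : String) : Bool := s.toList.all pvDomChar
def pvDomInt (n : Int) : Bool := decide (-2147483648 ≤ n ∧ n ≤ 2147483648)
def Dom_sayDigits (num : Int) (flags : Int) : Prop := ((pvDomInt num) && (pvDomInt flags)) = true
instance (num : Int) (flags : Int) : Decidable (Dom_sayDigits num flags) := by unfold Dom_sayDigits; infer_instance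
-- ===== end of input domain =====

-- B re-implements A by one pass over maximal groupby-runs of str(num) (zero-run arithmetic + token join)
-- instead of A's char-by-char boolean-flag loop with string concatenation; objective: alternative decomposition.

-- ===== PORT A =====
def ONES : List String :=
  ["zero", "one", "two", "three", "four", "five", "six", "seven", "eight", "nine",
   "ten", "eleven", "twelve", "thirteen", "fourteen", "fifteen", "sixteen",
   "seventeen", "eighteen", "nineteen"]

-- int(i) for a single char i; exact where it is used (guarded by i.isdigit(), ASCII digits)
def pvDigitVal (c : Char) : Int := ((c.toNat - 48 : Nat) : Int)

-- the body of A's `for i in str(num):` loop, state = (retval, prev_o)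
def pvStepA (st : List Char × Bool) (i : Char) : List Char × Bool :=
  if !(PySem.Chars.isdigit i) then (st.1, false)
  else if pvDigitVal i = 0 then
    if st.2 then (st.1 ++ "double oh ".toList, false) else (st.1, true)
  else
    let st1 := if st.2 then (st.1 ++ "oh ".toList, false) else st
    (st1.1 ++ (PySem.List.pyGetD ONES (pvDigitVal i) "").toList ++ [' '], false)

def sayDigits (num : Int) (flags : Int) : String :=
  let st := (PySem.Int.toChars num).foldl pvStepA ([], false)
  let retval := if st.2 then st.1 ++ "oh".toList else st.1
  String.ofList (PySem.Chars.rstrip retval)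

-- ===== PORT B =====
-- key(c) of Source B
def pvKey (c : Char) : Char :=
  if c = '0' then '0' else if PySem.Chars.isdigit c then 'd' else 'x'

-- itertools.groupby(str(num), key=_key) as (key, chars-of-run) pairs
def pvGroupRuns : List Char → List (Char × List Char)
  | [] => []
  | c :: r =>
    (pvKey c, c :: r.takeWhile (fun d => pvKey d == pvKey c)) ::
      pvGroupRuns (r.dropWhile (fun d => pvKey d == pvKey c))
  termination_by l => l.length
  decreasing_by
    simp only [List.length_cons]
    exact Nat.lt_succ_of_le (List.length_dropWhile_le _ _)

def pvNextIsX : List (Char × List Char) → Bool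
  | (k, _) :: _ => k == 'x'
  | [] => false

-- the `for idx, (k, chars) in enumerate(groups):` loop, lookahead = rest of the group list
def pvEmit : List (Char × List Char) → List String
  | [] => []
  | (k, cs) :: gs =>
    if k = '0' then
      List.replicate (cs.length / 2) "double oh"
        ++ (if cs.length % 2 = 1 ∧ pvNextIsX gs = false then ["oh"] else [])
        ++ pvEmit gs
    else if k = 'd' then
      cs.map (fun ch => PySem.List.pyGetD ONES (pvDigitVal ch) "") ++ pvEmit gs
    else pvEmit gs

def sayDigits_alt (num : Int) (flags : Int) : String :=
  PySem.Str.join " " (pvEmit (pvGroupRuns (PySem.Int.toChars num)))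

-- ===== PRECONDITION & SPEC =====
def Spec_sayDigits (num : Int) (flags : Int) (out : String) : Prop := out = sayDigits_alt num flags
instance (num : Int) (flags : Int) (out : String) : Decidable (Spec_sayDigits num flags out) := by unfold Spec_sayDigits; infer_instance

-- ===== CLAIM (what is proved, stated in full; the proofs are below) =====
def Claim_equal_sayDigits : Prop := ∀ (num : Int) (flags : Int), Dom_sayDigits num flags → Spec_sayDigits num flags (sayDigits num flags)

-- ===== LEMMAS AND PROOFS =====

-- token word for a nonzero digit char
def wordOf (c : Char) : List Char := (PySem.List.pyGetD ONES (pvDigitVal c) "").toList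

-- specification-level token list of A's loop from state prev
def Tk : List Char → Bool → List (List Char)
  | [], prev => if prev then ["oh".toList] else []
  | c :: r, prev =>
    if PySem.Chars.isdigit c = true then
      if c = '0' then (if prev then "double oh".toList :: Tk r false else Tk r true)
      else (if prev then ["oh".toList] else []) ++ wordOf c :: Tk r false
    else Tk r false

-- recursion form of A's loop: characters appended from here on, final "oh" included
def Arec : List Char → Bool → List Char
  | [], prev => if prev then "oh".toList else []
  | c :: r, prev =>
    if PySem.Chars.isdigit c = true then
      if pvDigitVal c = 0 then
        (if prev then "double oh ".toList ++ Arec r false else Arec r true)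
      else (if prev then "oh ".toList else []) ++ wordOf c ++ [' '] ++ Arec r false
    else Arec r false

-- the final value of prev_o
def endsPrev : List Char → Bool → Bool
  | [], prev => prev
  | c :: r, prev =>
    if PySem.Chars.isdigit c = true then
      if c = '0' then (if prev then endsPrev r false else endsPrev r true)
      else endsPrev r false
    else endsPrev r false

-- a token is nonempty and ends in a non-space character
def Qtok (t : List Char) : Bool :=
  match t.reverse with
  | [] => false
  | c :: _ => !(PySem.Chars.isspace c)

lemma isdigit_zero : PySem.Chars.isdigit '0' = true := by decide

lemma isdigit_bounds {c : Char} (h : PySem.Chars.isdigit c = true) :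
    48 ≤ c.toNat ∧ c.toNat ≤ 57 := by
  simp [PySem.Chars.isdigit, Char.le_def, UInt32.le_iff_toNat_le] at h
  exact h

lemma digitVal_zero_iff {c : Char} (h : PySem.Chars.isdigit c = true) :
    pvDigitVal c = 0 ↔ c = '0' := by
  obtain ⟨h1, h2⟩ := isdigit_bounds h
  unfold pvDigitVal
  constructor
  · intro hz
    have h48 : c.toNat = 48 := by
      have : c.toNat - 48 = 0 := by exact_mod_cast hz
      omega
    have hv : c.val = ('0' : Char).val := by
      apply UInt32.toNat_inj.mp
      show c.val.toNat = ('0' : Char).val.toNat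
      exact h48
    exact Char.ext hv
  · intro hc; subst hc; decide

lemma foldA (l : List Char) : ∀ (acc : List Char) (prev : Bool),
    (List.foldl pvStepA (acc, prev) l).1
      ++ (if (List.foldl pvStepA (acc, prev) l).2 then "oh".toList else [])
    = acc ++ Arec l prev := by
  induction l with
  | nil => intro acc prev; cases prev <;> simp [Arec]
  | cons c r ih =>
    intro acc prev
    by_cases h : PySem.Chars.isdigit c = true
    · by_cases hz : pvDigitVal c = 0
      · cases prev with
        | true =>
          simp only [List.foldl_cons, pvStepA, h, hz, Arec, Bool.not_true,
            Bool.false_eq_true, if_true, if_false]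
          rw [ih]
          simp
        | false =>
          simp only [List.foldl_cons, pvStepA, h, hz, Arec, Bool.not_true,
            Bool.false_eq_true, if_true, if_false]
          rw [ih]
      · cases prev with
        | true =>
          simp only [List.foldl_cons, pvStepA, h, hz, Arec, Bool.not_true,
            Bool.false_eq_true, if_true, if_false]
          rw [ih]
          simp [wordOf]
        | false =>
          simp only [List.foldl_cons, pvStepA, h, hz, Arec, Bool.not_true,
            Bool.false_eq_true, if_true, if_false]
          rw [ih]
          simp [wordOf]
    · simp only [List.foldl_cons, pvStepA, h, Arec, Bool.not_false,
        Bool.false_eq_true, if_true, if_false]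
      rw [ih]

lemma endsPrev_ne_nil (l : List Char) : ∀ prev, endsPrev l prev = true → Tk l prev ≠ [] := by
  induction l with
  | nil => intro prev h; simp [endsPrev] at h; simp [Tk, h]
  | cons c r ih =>
    intro prev h
    by_cases hd : PySem.Chars.isdigit c = true
    · by_cases hz : c = '0'
      · cases prev with
        | true =>
          simp [Tk, hd, hz, isdigit_zero]
        | false =>
          simp only [endsPrev, hd, hz, isdigit_zero, if_true, if_false] at h
          simp only [Tk, hd, hz, isdigit_zero, if_true, if_false]
          exact ih true h
      · simp [Tk, hd, hz]
    · simp only [endsPrev, hd, Bool.false_eq_true, if_false] at h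
      simp only [Tk, hd, Bool.false_eq_true, if_false]
      exact ih false h

lemma join_cons (a : List Char) (ts : List (List Char)) :
    PySem.Chars.join [' '] (a :: ts)
      = a ++ (if ts = [] then [] else ' ' :: PySem.Chars.join [' '] ts) := by
  cases ts with
  | nil => simp [PySem.Chars.join_singleton]
  | cons b ts' => simp [PySem.Chars.join_cons_cons]

lemma join_concat (ts : List (List Char)) (t : List Char) :
    PySem.Chars.join [' '] (ts ++ [t])
      = PySem.Chars.join [' '] ts ++ (if ts = [] then [] else [' ']) ++ t := by
  induction ts with
  | nil => simp [PySem.Chars.join_singleton, PySem.Chars.join_nil]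
  | cons a ts' ih =>
    rw [List.cons_append, join_cons, join_cons, ih]
    cases ts' with
    | nil => simp [PySem.Chars.join_singleton]
    | cons b ts'' => simp

lemma Arec_join (l : List Char) : ∀ prev,
    Arec l prev = PySem.Chars.join [' '] (Tk l prev)
      ++ (if endsPrev l prev then [] else if Tk l prev = [] then [] else [' ']) := by
  induction l with
  | nil => intro prev; cases prev <;> simp [Arec, Tk, endsPrev, PySem.Chars.join_nil, PySem.Chars.join_singleton]
  | cons c r ih =>
    intro prev
    by_cases hd : PySem.Chars.isdigit c = true
    · by_cases hz : c = '0'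
      · have hv : pvDigitVal c = 0 := (digitVal_zero_iff hd).mpr hz
        cases prev with
        | true =>
          simp only [Arec, Tk, endsPrev, hd, hz, hv, isdigit_zero, if_true]
          rw [ih false, join_cons]
          rcases hts : Tk r false with _ | ⟨b, ts'⟩
          · have hep : endsPrev r false = false := by
              cases hh : endsPrev r false
              · rfl
              · exact absurd hts (endsPrev_ne_nil r false hh)
            simp [hep, PySem.Chars.join_nil]
            decide
          · by_cases hep : endsPrev r false = true <;> simp [hep, hts] <;> try decide
        | false =>
          simp only [Arec, Tk, endsPrev, hd, hz, hv, isdigit_zero, if_true]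
          exact ih true
      · have hv : ¬ (pvDigitVal c = 0) := fun hh => hz ((digitVal_zero_iff hd).mp hh)
        cases prev with
        | true =>
          simp only [Arec, Tk, endsPrev, hd, hz, hv, if_true, if_false,
            List.singleton_append]
          rw [ih false, join_cons, join_cons]
          rcases hts : Tk r false with _ | ⟨b, ts'⟩
          · have hep : endsPrev r false = false := by
              cases hh : endsPrev r false
              · rfl
              · exact absurd hts (endsPrev_ne_nil r false hh)
            simp [hep, PySem.Chars.join_nil]
          · by_cases hep : endsPrev r false = true <;> simp [hep, hts]
        | false =>
          simp only [Arec, Tk, endsPrev, hd, hz, hv, if_true, if_false,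
            Bool.false_eq_true, List.nil_append]
          rw [ih false, join_cons]
          rcases hts : Tk r false with _ | ⟨b, ts'⟩
          · have hep : endsPrev r false = false := by
              cases hh : endsPrev r false
              · rfl
              · exact absurd hts (endsPrev_ne_nil r false hh)
            simp [hep, PySem.Chars.join_nil]
          · by_cases hep : endsPrev r false = true <;> simp [hep, hts]
    · simp only [Arec, Tk, endsPrev, hd, Bool.false_eq_true, if_false]
      exact ih false

lemma word_Q {c : Char} (h : PySem.Chars.isdigit c = true) (h0 : c ≠ '0') :
    Qtok (wordOf c) = true := by
  obtain ⟨h1, h2⟩ := isdigit_bounds h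
  have h48 : c.toNat ≠ 48 := by
    intro hh
    apply h0
    exact Char.ext (UInt32.toNat_inj.mp (show c.val.toNat = ('0' : Char).val.toNat from hh))
  unfold wordOf pvDigitVal
  have hb : 1 ≤ c.toNat - 48 ∧ c.toNat - 48 ≤ 9 := by omega
  generalize hk : c.toNat - 48 = d at hb
  obtain ⟨hb1, hb2⟩ := hb
  interval_cases d <;> decide

lemma tok_Q (l : List Char) : ∀ prev t, t ∈ Tk l prev → Qtok t = true := by
  induction l with
  | nil =>
    intro prev t ht
    cases prev with
    | false => simp [Tk] at ht
    | true => simp [Tk] at ht; subst ht; decide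
  | cons c r ih =>
    intro prev t ht
    by_cases hd : PySem.Chars.isdigit c = true
    · by_cases hz : c = '0'
      · cases prev with
        | true =>
          simp only [Tk, hd, hz, isdigit_zero, if_true, List.mem_cons] at ht
          rcases ht with ht | ht
          · subst ht; decide
          · exact ih false t ht
        | false =>
          simp only [Tk, hd, hz, isdigit_zero, if_true, if_false] at ht
          exact ih true t ht
      · cases prev with
        | true =>
          simp only [Tk, hd, hz, if_true, if_false, List.cons_append, List.nil_append,
            List.mem_cons] at ht
          rcases ht with ht | ht | ht
          · subst ht; decide
          · subst ht; exact word_Q hd hz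
          · exact ih false t ht
        | false =>
          simp only [Tk, hd, hz, if_true, if_false, Bool.false_eq_true, List.nil_append,
            List.mem_cons] at ht
          rcases ht with ht | ht
          · subst ht; exact word_Q hd hz
          · exact ih false t ht
    · simp only [Tk, hd, Bool.false_eq_true, if_false] at ht
      exact ih false t ht

lemma rstrip_of_Q (x t : List Char) (h : Qtok t = true) :
    PySem.Chars.rstrip (x ++ t) = x ++ t := by
  unfold PySem.Chars.rstrip
  rcases ht : t.reverse with _ | ⟨c, s⟩
  · simp [Qtok, ht] at h
  · have hsp : PySem.Chars.isspace c = false := by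
      simp [Qtok, ht] at h; exact h
    rw [List.reverse_append, ht, List.cons_append,
      List.dropWhile_cons_of_neg (by simp [hsp]), ← List.cons_append, ← ht,
      ← List.reverse_append, List.reverse_reverse]

lemma rstrip_space_of_Q (x t : List Char) (h : Qtok t = true) :
    PySem.Chars.rstrip (x ++ t ++ [' ']) = x ++ t := by
  have hrev : (x ++ t ++ [' ']).reverse = ' ' :: (x ++ t).reverse := by simp
  unfold PySem.Chars.rstrip
  rw [hrev, List.dropWhile_cons_of_pos (by decide)]
  have h2 := rstrip_of_Q x t h
  unfold PySem.Chars.rstrip at h2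
  exact h2

-- group facts
lemma dropWhile_head_false {p : Char → Bool} : ∀ (r : List Char) (h : Char) (t : List Char),
    r.dropWhile p = h :: t → p h = false := by
  intro r
  induction r with
  | nil => intro h t hh; simp at hh
  | cons a r' ih =>
    intro h t hh
    by_cases hp : p a = true
    · rw [List.dropWhile_cons_of_pos hp] at hh
      exact ih h t hh
    · rw [List.dropWhile_cons_of_neg hp] at hh
      cases hh
      exact Bool.eq_false_iff.mpr hp

lemma Tk_x (run : List Char) (hx : ∀ d ∈ run, PySem.Chars.isdigit d = false) (rest : List Char) :
    Tk (run ++ rest) false = Tk rest false := by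
  induction run with
  | nil => simp
  | cons d run' ih =>
    have hd := hx d (List.mem_cons_self)
    simp only [List.cons_append, Tk, hd, Bool.false_eq_true, if_false]
    exact ih (fun e he => hx e (List.mem_cons_of_mem d he))

lemma Tk_d (run : List Char) (hd : ∀ d ∈ run, PySem.Chars.isdigit d = true ∧ d ≠ '0')
    (rest : List Char) :
    Tk (run ++ rest) false = run.map wordOf ++ Tk rest false := by
  induction run with
  | nil => simp
  | cons d run' ih =>
    obtain ⟨hdd, hdz⟩ := hd d (List.mem_cons_self)
    simp only [List.cons_append, Tk, hdd, hdz, if_true, if_false, Bool.false_eq_true,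
      List.nil_append, List.map_cons]
    rw [ih (fun e he => hd e (List.mem_cons_of_mem d he))]

lemma Tk_z (m : Nat) (rest : List Char) :
    Tk (List.replicate m '0' ++ rest) false
      = List.replicate (m / 2) "double oh".toList
        ++ (if m % 2 = 1 then Tk rest true else Tk rest false) := by
  induction m using Nat.strong_induction_on with
  | _ m ih =>
    match m with
    | 0 => simp
    | 1 =>
      simp [Tk, isdigit_zero, List.replicate_succ]
    | (m + 2) =>
      have e1 : (m + 2) / 2 = m / 2 + 1 := by omega
      have e2 : (m + 2) % 2 = m % 2 := by omega
      rw [e1, e2, List.replicate_succ, List.replicate_succ]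
      simp only [List.cons_append, Tk, isdigit_zero, if_true]
      rw [ih m (by omega)]
      simp [List.replicate_succ]

lemma key_zero {d : Char} (h : pvKey d = '0') : d = '0' := by
  unfold pvKey at h
  split_ifs at h with h1 h2
  · exact h1
  · exact absurd h (by decide)
  · exact absurd h (by decide)

lemma key_d {d : Char} (h : pvKey d = 'd') : PySem.Chars.isdigit d = true ∧ d ≠ '0' := by
  unfold pvKey at h
  split_ifs at h with h1 h2
  · exact absurd h (by decide)
  · exact ⟨h2, h1⟩
  · exact absurd h (by decide)

lemma key_x {d : Char} (h : pvKey d = 'x') : PySem.Chars.isdigit d = false := by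
  unfold pvKey at h
  split_ifs at h with h1 h2
  · exact absurd h (by decide)
  · exact absurd h (by decide)
  · exact Bool.eq_false_iff.mpr h2

lemma Tk_true_split (rest : List Char) (hh : ∀ h, rest.head? = some h → h ≠ '0') :
    Tk rest true
      = (if pvNextIsX (pvGroupRuns rest) = false then ["oh".toList] else []) ++ Tk rest false := by
  cases rest with
  | nil => simp [Tk, pvGroupRuns, pvNextIsX]
  | cons h t =>
    have hh0 : h ≠ '0' := hh h rfl
    rw [pvGroupRuns]
    by_cases hd : PySem.Chars.isdigit h = true
    · have hk : pvKey h = 'd' := by unfold pvKey; simp [hh0, hd]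
      simp [Tk, hd, hh0, pvNextIsX, hk]
    · have hk : pvKey h = 'x' := by unfold pvKey; simp [hh0, hd]
      simp [Tk, hd, pvNextIsX, hk]

lemma Bmain (n : Nat) : ∀ (l : List Char), l.length ≤ n →
    (pvEmit (pvGroupRuns l)).map String.toList = Tk l false := by
  induction n with
  | zero =>
    intro l hl
    have : l = [] := List.eq_nil_of_length_eq_zero (by omega)
    subst this
    simp [pvGroupRuns, pvEmit, Tk]
  | succ n ih =>
    intro l hl
    cases l with
    | nil => simp [pvGroupRuns, pvEmit, Tk]
    | cons c r =>
      rw [pvGroupRuns]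
      set p : Char → Bool := fun d => pvKey d == pvKey c with hp
      obtain ⟨rest, hrest⟩ : ∃ rest, rest = r.dropWhile p := ⟨_, rfl⟩
      rw [← hrest]
      have hsplit : c :: r = (c :: r.takeWhile p) ++ rest := by
        simp [hrest, List.takeWhile_append_dropWhile]
      have hrl : rest.length ≤ n := by
        have h1 := List.length_dropWhile_le p r
        simp only [List.length_cons] at hl
        rw [hrest]
        omega
      have hrun : ∀ d ∈ c :: r.takeWhile p, pvKey d = pvKey c := by
        intro d hdm
        rcases List.mem_cons.mp hdm with hdm | hdm
        · rw [hdm]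
        · have h2 : p d = true := List.mem_takeWhile_imp hdm
          simp only [hp, beq_iff_eq] at h2
          exact h2
      have hhead : ∀ h t, rest = h :: t → pvKey h ≠ pvKey c := by
        intro h t hht
        have h2 := dropWhile_head_false r h t (hrest ▸ hht)
        simp only [hp, beq_eq_false_iff_ne, ne_eq] at h2
        exact h2
      by_cases hz : c = '0'
      · have hkc : pvKey c = '0' := by rw [hz]; rfl
        have hall : ∀ d ∈ c :: r.takeWhile p, d = '0' := fun d hdm =>
          key_zero (hkc ▸ hrun d hdm)
        have hrep := List.eq_replicate_of_mem hall
        rw [pvEmit, if_pos hkc, hsplit, hrep, Tk_z]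
        rw [List.map_append, List.map_append, List.map_replicate]
        by_cases hodd : (c :: r.takeWhile p).length % 2 = 1
        · rw [if_pos hodd]
          have hodd' : ((r.takeWhile p).length + 1) % 2 = 1 := by simpa using hodd
          have hh : ∀ h, rest.head? = some h → h ≠ '0' := by
            intro h hhh
            cases hrr : rest with
            | nil => rw [hrr] at hhh; simp at hhh
            | cons h' t' =>
              rw [hrr] at hhh
              have he : h' = h := by simpa using hhh
              subst he
              intro hc
              exact hhead h' t' hrr (by rw [hc, hkc]; rfl)
          rw [Tk_true_split rest hh]
          by_cases hnx : pvNextIsX (pvGroupRuns rest) = false <;>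
            simp [hnx, hodd', ih rest hrl]
        · rw [if_neg hodd]
          have hodd' : ¬ ((r.takeWhile p).length + 1) % 2 = 1 := by simpa using hodd
          simp [hodd', ih rest hrl]
      · by_cases hdg : PySem.Chars.isdigit c = true
        · have hkc : pvKey c = 'd' := by unfold pvKey; simp [hz, hdg]
          have hall : ∀ d ∈ c :: r.takeWhile p, PySem.Chars.isdigit d = true ∧ d ≠ '0' :=
            fun d hdm => key_d (hkc ▸ hrun d hdm)
          rw [pvEmit, if_neg (by rw [hkc]; decide), if_pos hkc]
          rw [hsplit, Tk_d _ hall, List.map_append, List.map_map]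
          rw [ih rest hrl]
          rfl
        · have hkc : pvKey c = 'x' := by unfold pvKey; simp [hz, hdg]
          have hall : ∀ d ∈ c :: r.takeWhile p, PySem.Chars.isdigit d = false :=
            fun d hdm => key_x (hkc ▸ hrun d hdm)
          rw [pvEmit, if_neg (by rw [hkc]; decide), if_neg (by rw [hkc]; decide)]
          rw [hsplit, Tk_x _ hall]
          exact ih rest hrl

theorem sayDigits_spec : Claim_equal_sayDigits := by
  unfold Claim_equal_sayDigits
  intro num flags _
  show sayDigits num flags = sayDigits_alt num flags
  unfold sayDigits sayDigits_alt PySem.Str.join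
  set l := PySem.Int.toChars num with hlp
  simp only []
  set st := List.foldl pvStepA ([], false) l with hst
  have hretval : (if st.2 then st.1 ++ "oh".toList else st.1) = Arec l false := by
    have hfa := foldA l [] false
    rw [← hst] at hfa
    cases hs2 : st.2 <;> simpa [hs2] using hfa
  rw [hretval]
  have hmap : (pvEmit (pvGroupRuns l)).map String.toList = Tk l false :=
    Bmain l.length l le_rfl
  have hsep : (" " : String).toList = [' '] := rfl
  rw [hsep, hmap]
  congr 1
  rw [Arec_join l false]
  rcases List.eq_nil_or_concat (Tk l false) with hts | ⟨ts', t, hts⟩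
  · have hep : endsPrev l false = false := by
      cases hh : endsPrev l false
      · rfl
      · exact absurd hts (endsPrev_ne_nil l false hh)
    rw [hts, hep]
    simp [PySem.Chars.join_nil]
    decide
  · rw [List.concat_eq_append] at hts
    have hq : Qtok t = true := tok_Q l false t (by rw [hts]; simp)
    rw [hts, join_concat]
    have hne2 : ts' ++ [t] ≠ [] := by simp
    by_cases hep : endsPrev l false = true
    · rw [if_pos hep, List.append_nil]
      exact rstrip_of_Q _ t hq
    · rw [if_neg hep, if_neg hne2]
      exact rstrip_space_of_Q _ t hq
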